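-- pv_equiv track=rewrite | github.com/hfwen0502/sbd | python/examples/bitstring_to_determinant_cpp_demo.py | old_python_method
-- ===== SOURCE A (Python) =====
-- def old_python_method(bitstring, num_orbitals=10, bit_length=20):
--     """Old Python implementation for comparison"""
--     # Convert hex to integer
--     value = int(bitstring, 16)
--
--     # Extract alpha and beta parts
--     alpha_mask = (1 << num_orbitals) - 1
--     beta_mask = alpha_mask << num_orbitals
--
--     alpha = value & alpha_mask
--     beta = (value & beta_mask) >> num_orbitals
--
--     # Convert to binary strings
--     alpha_binary = bin(alpha)[2:].zfill(num_orbitals)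
--     beta_binary = bin(beta)[2:].zfill(num_orbitals)
--
--     # Python implementation of from_string
--     def python_from_string(binary_str, bit_length, total_bits):
--         bits_per_word = 64
--         num_words = (total_bits + bits_per_word - 1) // bits_per_word
--         result = [0] * num_words
--
--         for i, bit in enumerate(reversed(binary_str)):
--             if bit == '1':
--                 word_idx = i // bits_per_word
--                 bit_idx = i % bits_per_word
--                 result[word_idx] |= (1 << bit_idx)
--
--         return result
--
--     alpha_det = python_from_string(alpha_binary, bit_length, num_orbitals)
--     beta_det = python_from_string(beta_binary, bit_length, num_orbitals)
--
--     return alpha_det, beta_det, alpha_binary, beta_binary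
-- ===== SOURCE B (Python) =====
-- def old_python_method(bitstring, num_orbitals=10, bit_length=20):
--     """Word-granularity re-implementation: extract 64-bit words from the
--     integer directly instead of setting bits one by one from the string."""
--     value = int(bitstring, 16)
--
--     alpha_mask = (1 << num_orbitals) - 1
--     beta_mask = alpha_mask << num_orbitals
--
--     alpha = value & alpha_mask
--     beta = (value & beta_mask) >> num_orbitals
--
--     alpha_binary = bin(alpha)[2:].zfill(num_orbitals)
--     beta_binary = bin(beta)[2:].zfill(num_orbitals)
--
--     num_words = (num_orbitals + 63) // 64
--     mask64 = (1 << 64) - 1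
--     alpha_det = [(alpha >> (64 * w)) & mask64 for w in range(num_words)]
--     beta_det = [(beta >> (64 * w)) & mask64 for w in range(num_words)]
--
--     return alpha_det, beta_det, alpha_binary, beta_binary
-- ===== Notes on version B (the rewrite author's own statement) =====
-- stated objective: simpler
-- what changed: The bit-by-bit python_from_string loop (enumerate over the reversed binary string, OR-ing single bits into words) is replaced by direct word extraction: each 64-bit word is computed in one shot as (alpha >> 64*w) & mask64 over range(num_words), so the inner helper and the per-character loop disappear.
import Mathlib
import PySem

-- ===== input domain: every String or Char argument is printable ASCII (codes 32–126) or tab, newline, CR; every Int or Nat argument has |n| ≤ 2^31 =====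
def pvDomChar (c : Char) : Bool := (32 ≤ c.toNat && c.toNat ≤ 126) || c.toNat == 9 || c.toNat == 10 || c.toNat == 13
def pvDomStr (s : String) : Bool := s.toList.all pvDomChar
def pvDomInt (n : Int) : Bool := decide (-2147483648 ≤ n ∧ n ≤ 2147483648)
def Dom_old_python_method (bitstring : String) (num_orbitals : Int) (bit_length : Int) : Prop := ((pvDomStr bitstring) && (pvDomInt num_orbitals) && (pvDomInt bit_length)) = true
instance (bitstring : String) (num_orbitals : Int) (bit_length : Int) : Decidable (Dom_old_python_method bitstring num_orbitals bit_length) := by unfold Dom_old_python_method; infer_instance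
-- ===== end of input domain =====

-- B replaces the bit-by-bit python_from_string loop by direct 64-bit word extraction
-- (one shift-and-mask per word); the hex decode, masks and binary strings are unchanged.

-- ===== PORT A =====
-- nested helper python_from_string, transliterated (enumerate over the reversed string,
-- OR-ing one bit at a time into the word array)
def pyFromString (binary_str : List Char) (bit_length : Int) (total_bits : Int) : List Int :=
  let bits_per_word : Int := 64
  let num_words : Int := PySem.Int.floordiv (total_bits + bits_per_word - 1) bits_per_word
  let result : List Int := PySem.List.pyRepeat [(0 : Int)] num_words
  (PySem.List.enumerate binary_str.reverse 0).foldl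
    (fun result ib =>
      if ib.2 = '1' then
        let word_idx := PySem.Int.floordiv ib.1 bits_per_word
        let bit_idx := PySem.Int.mod ib.1 bits_per_word
        PySem.List.pySetD result word_idx
          (PySem.Int.bor (PySem.List.pyGetD result word_idx 0) ((1 : Int) <<< bit_idx.toNat))
      else result)
    result

def old_python_method (bitstring : String) (num_orbitals : Int) (bit_length : Int) : List Int × List Int × String × String :=
  let value : Int := (PySem.Int.ofStrBase? bitstring 16).getD 0   -- Pre_ excludes the ValueError case
  let alpha_mask : Int := ((1 : Int) <<< num_orbitals.toNat) - 1  -- Pre_ gives 0 ≤ num_orbitals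
  let beta_mask : Int := alpha_mask <<< num_orbitals.toNat
  let alpha : Int := PySem.Int.band value alpha_mask
  let beta : Int := (PySem.Int.band value beta_mask) >>> num_orbitals.toNat
  let alpha_binary : List Char := PySem.Chars.zfill (PySem.List.slice (PySem.Int.toBinChars0b alpha) (some 2) none) num_orbitals
  let beta_binary : List Char := PySem.Chars.zfill (PySem.List.slice (PySem.Int.toBinChars0b beta) (some 2) none) num_orbitals
  (pyFromString alpha_binary bit_length num_orbitals,
   pyFromString beta_binary bit_length num_orbitals,
   String.ofList alpha_binary, String.ofList beta_binary)

-- ===== PORT B =====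
def old_python_method_alt (bitstring : String) (num_orbitals : Int) (bit_length : Int) : List Int × List Int × String × String :=
  let value : Int := (PySem.Int.ofStrBase? bitstring 16).getD 0
  let alpha_mask : Int := ((1 : Int) <<< num_orbitals.toNat) - 1
  let beta_mask : Int := alpha_mask <<< num_orbitals.toNat
  let alpha : Int := PySem.Int.band value alpha_mask
  let beta : Int := (PySem.Int.band value beta_mask) >>> num_orbitals.toNat
  let alpha_binary : List Char := PySem.Chars.zfill (PySem.List.slice (PySem.Int.toBinChars0b alpha) (some 2) none) num_orbitals
  let beta_binary : List Char := PySem.Chars.zfill (PySem.List.slice (PySem.Int.toBinChars0b beta) (some 2) none) num_orbitals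
  let num_words : Int := PySem.Int.floordiv (num_orbitals + 63) 64
  let mask64 : Int := ((1 : Int) <<< 64) - 1
  let alpha_det : List Int := (PySem.List.pyRange 0 num_words 1).map (fun w => PySem.Int.band (alpha >>> (64 * w).toNat) mask64)
  let beta_det : List Int := (PySem.List.pyRange 0 num_words 1).map (fun w => PySem.Int.band (beta >>> (64 * w).toNat) mask64)
  (alpha_det, beta_det, String.ofList alpha_binary, String.ofList beta_binary)

-- ===== PRECONDITION & SPEC =====
-- Pre_ excludes exactly the inputs where Python A raises: a bitstring int(·,16) rejects
-- (ValueError) and negative num_orbitals (ValueError on the negative shift count).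
def Pre_old_python_method (bitstring : String) (num_orbitals : Int) (bit_length : Int) : Prop :=
  (PySem.Int.ofStrBase? bitstring 16).isSome = true ∧ 0 ≤ num_orbitals
instance (bitstring : String) (num_orbitals : Int) (bit_length : Int) : Decidable (Pre_old_python_method bitstring num_orbitals bit_length) := by unfold Pre_old_python_method; infer_instance
def pvWitness_old_python_method : String × Int × Int := ("ff", 3, 20)

def Spec_old_python_method (bitstring : String) (num_orbitals : Int) (bit_length : Int) (out : List Int × List Int × String × String) : Prop := out = old_python_method_alt bitstring num_orbitals bit_length
instance (bitstring : String) (num_orbitals : Int) (bit_length : Int) (out : List Int × List Int × String × String) : Decidable (Spec_old_python_method bitstring num_orbitals bit_length out) := by unfold Spec_old_python_method; infer_instance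

-- ===== CLAIM (what is proved, stated in full; the proofs are below) =====
def Claim_equal_old_python_method : Prop := ∀ (bitstring : String) (num_orbitals : Int) (bit_length : Int), Dom_old_python_method bitstring num_orbitals bit_length → Pre_old_python_method bitstring num_orbitals bit_length → Spec_old_python_method bitstring num_orbitals bit_length (old_python_method bitstring num_orbitals bit_length)

-- ===== LEMMAS AND PROOFS =====

def bitChar (c : Char) : Nat := if c = '1' then 1 else 0

def lowVal : List Char → Nat
  | [] => 0
  | c :: cs => bitChar c + 2 * lowVal cs

-- LSB-first binary digits of a natural number
def binL : Nat → List Char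
  | 0 => []
  | (n+1) => Nat.digitChar ((n+1) % 2) :: binL ((n+1) / 2)
  decreasing_by omega

def wordAt (x w : Nat) : Nat := x / 2 ^ (64 * w) % 2 ^ 64

theorem lowVal_binL (n : Nat) : lowVal (binL n) = n := by
  induction n using Nat.strongRecOn with
  | ind n ih =>
    match n with
    | 0 => simp [binL, lowVal]
    | (m+1) =>
      rw [binL, lowVal, ih ((m+1)/2) (by omega)]
      rcases Nat.mod_two_eq_zero_or_one (m+1) with h | h <;>
        simp [h, Nat.digitChar, bitChar] <;> omega

theorem mem_binL (n : Nat) : ∀ c ∈ binL n, c = '0' ∨ c = '1' := by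
  induction n using Nat.strongRecOn with
  | ind n ih =>
    match n with
    | 0 => simp [binL]
    | (m+1) =>
      rw [binL]
      intro c hc
      rcases List.mem_cons.mp hc with h | h
      · subst h
        rcases Nat.mod_two_eq_zero_or_one (m+1) with h | h <;> simp [h, Nat.digitChar]
      · exact ih ((m+1)/2) (by omega) c h

theorem binL_ne_nil (n : Nat) (h : 0 < n) : binL n ≠ [] := by
  match n, h with
  | (m+1), _ => rw [binL]; simp

theorem toDigitsCore_two (fuel n : Nat) (ds : List Char) (h : n < fuel) (hn : 0 < n) :
    Nat.toDigitsCore 2 fuel n ds = (binL n).reverse ++ ds := by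
  induction fuel generalizing n ds with
  | zero => omega
  | succ fuel ih =>
    rw [Nat.toDigitsCore]
    by_cases h2 : n / 2 = 0
    · have hn1 : n = 1 := by omega
      subst hn1
      simp [binL, Nat.digitChar]
    · simp only [h2]
      rw [ih (n / 2) _ (by omega) (by omega)]
      conv_rhs => rw [show n = (n - 1) + 1 by omega]
      rw [binL]
      rw [show (n - 1) + 1 = n by omega]
      simp [List.append_assoc]

theorem toDigits_two (a : Nat) :
    Nat.toDigits 2 a = if a = 0 then ['0'] else (binL a).reverse := by
  by_cases h : a = 0
  · subst h; rfl
  · rw [if_neg h, show Nat.toDigits 2 a = Nat.toDigitsCore 2 (a+1) a [] from rfl,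
      toDigitsCore_two (a+1) a [] (by omega) (by omega), List.append_nil]

theorem lowVal_zeros (z : Nat) : lowVal (List.replicate z '0') = 0 := by
  induction z with
  | zero => rfl
  | succ z ih => simp [List.replicate, lowVal, ih, bitChar]

theorem lowVal_append_zeros (cs : List Char) (z : Nat) :
    lowVal (cs ++ List.replicate z '0') = lowVal cs := by
  induction cs with
  | nil => simpa using lowVal_zeros z
  | cons c cs ih => simp [lowVal, ih]

theorem lor_two_pow_add (u m : Nat) (h : u < 2 ^ m) : u ||| 2 ^ m = u + 2 ^ m := by
  apply Nat.eq_of_testBit_eq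
  intro i
  rw [Nat.testBit_lor, Nat.add_comm u (2 ^ m)]
  rcases lt_trichotomy i m with hi | hi | hi
  · rw [Nat.testBit_two_pow_add_gt hi,
      Nat.testBit_two_pow_of_ne (by omega), Bool.or_false]
  · subst hi
    rw [Nat.testBit_two_pow_add_eq, Nat.testBit_two_pow_self,
      Nat.testBit_eq_false_of_lt h]
    rfl
  · have h1 : 2 ^ m + u < 2 ^ i := by
      have h2 : (2:Nat) ^ m + 2 ^ m = 2 ^ (m + 1) := by ring
      have h3 : (2:Nat) ^ (m + 1) ≤ 2 ^ i := Nat.pow_le_pow_right (by norm_num) (by omega)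
      omega
    rw [Nat.testBit_eq_false_of_lt h1,
      Nat.testBit_eq_false_of_lt (by omega),
      Nat.testBit_two_pow_of_ne (by omega)]
    rfl

theorem wordAt_zero (w : Nat) : wordAt 0 w = 0 := by simp [wordAt]

theorem wordAt_lt (x k : Nat) (hx : x < 2 ^ k) : wordAt x (k / 64) < 2 ^ (k % 64) := by
  have h1 : x / 2 ^ (64 * (k / 64)) < 2 ^ (k % 64) := by
    rw [Nat.div_lt_iff_lt_mul (Nat.pow_pos (by norm_num))]
    calc x < 2 ^ k := hx
    _ = 2 ^ (k % 64) * 2 ^ (64 * (k / 64)) := by rw [← pow_add]; congr 1; omega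
  exact lt_of_le_of_lt (Nat.mod_le _ _) h1

theorem wordAt_add_eq (x k : Nat) (hx : x < 2 ^ k) :
    wordAt (x + 2 ^ k) (k / 64) = wordAt x (k / 64) + 2 ^ (k % 64) := by
  have hm : k % 64 < 64 := by omega
  have hpow : (2 : Nat) ^ k = 2 ^ (64 * (k / 64)) * 2 ^ (k % 64) := by
    rw [← pow_add]; congr 1; omega
  have h1 : x / 2 ^ (64 * (k / 64)) < 2 ^ (k % 64) := by
    rw [Nat.div_lt_iff_lt_mul (Nat.pow_pos (by norm_num))]
    calc x < 2 ^ k := hx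
    _ = 2 ^ (k % 64) * 2 ^ (64 * (k / 64)) := by rw [← pow_add]; congr 1; omega
  have h64 : (2 : Nat) ^ (k % 64) ≤ 2 ^ 64 := Nat.pow_le_pow_right (by norm_num) (by omega)
  have h64' : x / 2 ^ (64 * (k / 64)) + 2 ^ (k % 64) < 2 ^ 64 := by
    have h2 : (2:Nat) ^ (k % 64) + 2 ^ (k % 64) = 2 ^ (k % 64 + 1) := by ring
    have h3 : (2:Nat) ^ (k % 64 + 1) ≤ 2 ^ 64 := Nat.pow_le_pow_right (by norm_num) (by omega)
    omega
  unfold wordAt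
  rw [hpow, Nat.add_mul_div_left _ _ (Nat.pow_pos (by norm_num))]
  rw [Nat.mod_eq_of_lt h64', Nat.mod_eq_of_lt (lt_of_lt_of_le h1 h64)]

theorem wordAt_add_ne (x k w : Nat) (hx : x < 2 ^ k) (hw : w ≠ k / 64) :
    wordAt (x + 2 ^ k) w = wordAt x w := by
  rcases Nat.lt_or_ge w (k / 64) with hlt | hge
  · have hk64 : 64 * w + 64 ≤ k := by omega
    have hpow : (2 : Nat) ^ k = 2 ^ (64 * w) * (2 ^ 64 * 2 ^ (k - 64 * w - 64)) := by
      rw [← pow_add, ← pow_add]; congr 1; omega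
    unfold wordAt
    rw [hpow, Nat.add_mul_div_left _ _ (Nat.pow_pos (by norm_num)),
      Nat.add_mul_mod_self_left]
  · have hgt : k / 64 < w := by omega
    have hk : k + 1 ≤ 64 * w := by omega
    have h1 : x + 2 ^ k < 2 ^ (64 * w) := by
      have h2 : (2:Nat) ^ k + 2 ^ k = 2 ^ (k + 1) := by ring
      have h3 : (2:Nat) ^ (k + 1) ≤ 2 ^ (64 * w) := Nat.pow_le_pow_right (by norm_num) hk
      omega
    unfold wordAt
    rw [Nat.div_eq_of_lt h1, Nat.div_eq_of_lt (by omega)]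

theorem shiftl_one (m : Nat) : (1 : Int) <<< m = ((2 ^ m : Nat) : Int) := by
  rw [Int.shiftLeft_eq]; push_cast; ring

theorem band_bounds (v : Int) (m : Nat) :
    0 ≤ PySem.Int.band v ((m : Nat) : Int) ∧ PySem.Int.band v ((m : Nat) : Int) ≤ ((m : Nat) : Int) := by
  unfold PySem.Int.band
  split_ifs with h1 h2 h2
  · constructor
    · exact Int.natCast_nonneg _
    · simp only [Int.toNat_natCast]
      exact_mod_cast (Nat.and_le_right : v.toNat &&& m ≤ m)
  · exact absurd (Int.natCast_nonneg m) h2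
  · constructor
    · exact Int.natCast_nonneg _
    · simp only [Int.toNat_natCast]
      exact_mod_cast (Nat.sub_le m (m &&& (-v - 1).toNat))
  · exact absurd (Int.natCast_nonneg m) h2

-- the loop invariant of python_from_string: after OR-ing in the bits of cs (which start
-- at weight 2^k), the word array holds the 64-bit words of x + 2^k * lowVal cs
theorem foldInv (cs : List Char) (k x W : Nat) (r : List Int)
    (hlen : r.length = W)
    (hget : ∀ w, w < W → r[w]? = some ((wordAt x w : Nat) : Int))
    (hx : x < 2 ^ k)
    (hbound : x + 2 ^ k * lowVal cs < 2 ^ (64 * W)) :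
    ((PySem.List.enumerate cs (k : Int)).foldl
      (fun result ib =>
        if ib.2 = '1' then
          PySem.List.pySetD result (PySem.Int.floordiv ib.1 64)
            (PySem.Int.bor (PySem.List.pyGetD result (PySem.Int.floordiv ib.1 64) 0)
              ((1 : Int) <<< (PySem.Int.mod ib.1 64).toNat))
        else result) r).length = W ∧
    ∀ w, w < W → ((PySem.List.enumerate cs (k : Int)).foldl
      (fun result ib =>
        if ib.2 = '1' then
          PySem.List.pySetD result (PySem.Int.floordiv ib.1 64)
            (PySem.Int.bor (PySem.List.pyGetD result (PySem.Int.floordiv ib.1 64) 0)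
              ((1 : Int) <<< (PySem.Int.mod ib.1 64).toNat))
        else result) r)[w]? = some ((wordAt (x + 2 ^ k * lowVal cs) w : Nat) : Int) := by
  induction cs generalizing k x r with
  | nil =>
    simp only [PySem.List.enumerate_nil, List.foldl_nil, lowVal]
    exact ⟨hlen, by simpa using hget⟩
  | cons c cs ih =>
    rw [PySem.List.enumerate_cons, List.foldl_cons]
    have hcast : ((k : Int) + 1) = ((k + 1 : Nat) : Int) := by push_cast; ring
    rw [hcast]
    by_cases hc : c = '1'
    · subst hc
      simp only [reduceIte]
      have hfd : PySem.Int.floordiv (k : Int) 64 = ((k / 64 : Nat) : Int) := by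
        exact_mod_cast PySem.Int.floordiv_natCast k 64
      have hmd : PySem.Int.mod (k : Int) 64 = ((k % 64 : Nat) : Int) := by
        exact_mod_cast PySem.Int.mod_natCast k 64
      have hkW : k < 64 * W := by
        have hl : 1 ≤ lowVal ('1' :: cs) := by simp [lowVal, bitChar]
        have h2k : 2 ^ k < 2 ^ (64 * W) := by
          have h3 : 2 ^ k * 1 ≤ 2 ^ k * lowVal ('1' :: cs) := Nat.mul_le_mul_left _ hl
          omega
        exact (Nat.pow_lt_pow_iff_right (by norm_num)).mp h2k
      have hjW : k / 64 < W := by omega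
      have hu := wordAt_lt x k hx
      rw [hfd, hmd, Int.toNat_natCast, PySem.List.pySetD_natCast, PySem.List.pyGetD_natCast,
        List.getD_eq_getElem?_getD, hget (k / 64) hjW, Option.getD_some, shiftl_one,
        PySem.Int.bor_natCast, lor_two_pow_add _ _ hu]
      have hval : x + 2 ^ k * lowVal ('1' :: cs) = (x + 2 ^ k) + 2 ^ (k + 1) * lowVal cs := by
        simp only [lowVal, bitChar, if_pos]; ring
      rw [hval]
      refine ih (k + 1) (x + 2 ^ k) _ (by simp [hlen]) ?_ ?_ ?_
      · intro w hw
        by_cases hwj : w = k / 64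
        · subst hwj
          rw [List.getElem?_set_self (by omega), wordAt_add_eq x k hx]
        · rw [List.getElem?_set_ne (by omega), hget w hw, wordAt_add_ne x k w hx hwj]
      · have h2 : (2:Nat) ^ (k + 1) = 2 ^ k + 2 ^ k := by ring
        omega
      · rw [← hval]; exact hbound
    · simp only [if_neg hc]
      have hval : x + 2 ^ k * lowVal (c :: cs) = x + 2 ^ (k + 1) * lowVal cs := by
        simp only [lowVal, bitChar, if_neg hc]; ring
      rw [hval]
      refine ih (k + 1) x r hlen hget ?_ ?_
      · have h2 : (2:Nat) ^ (k + 1) = 2 ^ k + 2 ^ k := by ring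
        omega
      · rw [← hval]; exact hbound

-- the central fact: the bit-loop applied to the zfill'ed binary string of v equals
-- direct word extraction from v
theorem key (v : Int) (a n : Nat) (hv : v = ((a : Nat) : Int)) (ha : a < 2 ^ n) (bl : Int) :
    pyFromString (PySem.Chars.zfill (PySem.List.slice (PySem.Int.toBinChars0b v) (some 2) none) ((n : Nat) : Int)) bl ((n : Nat) : Int)
    = (PySem.List.pyRange 0 (PySem.Int.floordiv (((n : Nat) : Int) + 63) 64) 1).map
        (fun w => PySem.Int.band (v >>> (64 * w).toNat) (((1 : Int) <<< 64) - 1)) := by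
  subst hv
  have hbin : PySem.List.slice (PySem.Int.toBinChars0b ((a : Nat) : Int)) (some 2) none
      = Nat.toDigits 2 a := by
    unfold PySem.Int.toBinChars0b
    rw [if_neg (by omega), Int.toNat_natCast,
      show (2 : Int) = ((2 : Nat) : Int) from by norm_num,
      PySem.List.slice_from_natCast]
    rfl
  rw [hbin]
  set ds := Nat.toDigits 2 a with hds
  have hlow : lowVal ds.reverse = a := by
    rw [hds, toDigits_two]
    by_cases h : a = 0
    · subst h; simp [lowVal, bitChar]
    · rw [if_neg h, List.reverse_reverse, lowVal_binL]
  have hmem : ∀ c ∈ ds, c = '0' ∨ c = '1' := by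
    rw [hds, toDigits_two]
    by_cases h : a = 0
    · subst h; simp
    · rw [if_neg h]
      intro c hc
      exact mem_binL a c (List.mem_reverse.mp hc)
  have hne : ds ≠ [] := by
    rw [hds, toDigits_two]
    by_cases h : a = 0
    · subst h; simp
    · rw [if_neg h]
      simp only [ne_eq, List.reverse_eq_nil_iff]
      exact binL_ne_nil a (by omega)
  set s := PySem.Chars.zfill ds ((n : Nat) : Int) with hs
  obtain ⟨c, rest, hcr⟩ := List.exists_cons_of_ne_nil hne
  have hcb : c = '0' ∨ c = '1' := hmem c (by rw [hcr]; simp)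
  have hcsign : ¬(c = '+' ∨ c = '-') := by rcases hcb with rfl | rfl <;> decide
  have hsdef : s = if ((n : Nat) : Int) ≤ ((ds.length : Nat) : Int) then ds
      else List.replicate (((n : Nat) : Int).toNat - ds.length) '0' ++ ds := by
    rw [hs, hcr]
    unfold PySem.Chars.zfill
    by_cases h1 : ((n : Nat) : Int) ≤ (((c :: rest).length : Nat) : Int)
    · rw [if_pos h1, if_pos h1]
    · rw [if_neg h1, if_neg h1]
      exact if_neg hcsign
  have hslow : lowVal s.reverse = a := by
    rw [hsdef]
    split_ifs with h1
    · exact hlow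
    · rw [List.reverse_append, List.reverse_replicate, lowVal_append_zeros, hlow]
  set W := (n + 63) / 64 with hW
  have hfdW : PySem.Int.floordiv (((n : Nat) : Int) + 63) 64 = ((W : Nat) : Int) := by
    rw [show (((n : Nat) : Int) + 63) = ((n + 63 : Nat) : Int) from by push_cast; ring]
    exact_mod_cast PySem.Int.floordiv_natCast (n + 63) 64
  have hn64 : n ≤ 64 * W := by omega
  have hA := foldInv s.reverse 0 0 W (PySem.List.pyRepeat [(0 : Int)] ((W : Nat) : Int))
    (by rw [PySem.List.pyRepeat_singleton, List.length_replicate, Int.toNat_natCast])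
    (by intro w hw
        rw [PySem.List.pyRepeat_singleton, Int.toNat_natCast, List.getElem?_replicate,
          if_pos hw, wordAt_zero]
        simp)
    (by norm_num)
    (by rw [hslow]
        have h2 : (2:Nat) ^ n ≤ 2 ^ (64 * W) := Nat.pow_le_pow_right (by norm_num) hn64
        omega)
  rw [hslow] at hA
  simp only [pow_zero, one_mul, zero_add, Nat.cast_zero] at hA
  obtain ⟨hAlen, hAget⟩ := hA
  simp only [pyFromString]
  rw [show (((n : Nat) : Int) + 64 - 1) = ((n + 63 : Nat) : Int) from by push_cast; ring]
  rw [show PySem.Int.floordiv ((n + 63 : Nat) : Int) 64 = ((W : Nat) : Int) from by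
    exact_mod_cast PySem.Int.floordiv_natCast (n + 63) 64]
  rw [hfdW]
  rw [PySem.List.pyRange_zero_natCast, List.map_map]
  apply List.ext_getElem?
  intro i
  by_cases hi : i < W
  · rw [hAget i hi, List.getElem?_map, List.getElem?_range hi]
    simp only [Option.map_some, Function.comp_apply]
    congr 1
    rw [show ((64 : Int) * ((i : Nat) : Int)) = ((64 * i : Nat) : Int) from by push_cast; ring,
      Int.toNat_natCast]
    rw [show ((a : Nat) : Int) >>> (((64 * i : Nat)) : Int) = ((a >>> (64 * i) : Nat) : Int) from
        Int.shiftRight_natCast a (64 * i),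
      show (((1 : Int) <<< 64) - 1) = ((2 ^ 64 - 1 : Nat) : Int) from by decide,
      PySem.Int.band_natCast]
    rw [Nat.shiftRight_eq_div_pow, Nat.and_two_pow_sub_one_eq_mod]
    rfl
  · rw [List.getElem?_eq_none (by rw [hAlen]; omega),
      List.getElem?_eq_none (by simp [List.length_map, List.length_range]; omega)]

-- ===== VERDICT (by name: the statement is the Claim_ definition above) =====
theorem old_python_method_spec : Claim_equal_old_python_method := by
  intro bitstring num_orbitals bit_length hdom hpre
  obtain ⟨hsome, hnn⟩ := hpre
  obtain ⟨n, rfl⟩ : ∃ n : Nat, num_orbitals = ((n : Nat) : Int) :=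
    ⟨num_orbitals.toNat, (Int.toNat_of_nonneg hnn).symm⟩
  unfold Spec_old_python_method
  simp only [old_python_method, old_python_method_alt, Int.toNat_natCast]
  have h1le : (1 : Nat) ≤ 2 ^ n := Nat.one_le_two_pow
  have hmaskA : ((1 : Int) <<< n) - 1 = ((2 ^ n - 1 : Nat) : Int) := by
    rw [shiftl_one]; push_cast [h1le]; ring
  rw [hmaskA]
  have hmaskB : ((2 ^ n - 1 : Nat) : Int) <<< n = (((2 ^ n - 1) * 2 ^ n : Nat) : Int) := by
    rw [Int.shiftLeft_eq]; push_cast; ring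
  rw [hmaskB]
  set v : Int := (PySem.Int.ofStrBase? bitstring 16).getD 0 with hv
  obtain ⟨hA0, hA1⟩ := band_bounds v (2 ^ n - 1)
  have hAcast : PySem.Int.band v ((2 ^ n - 1 : Nat) : Int)
      = (((PySem.Int.band v ((2 ^ n - 1 : Nat) : Int)).toNat : Nat) : Int) :=
    (Int.toNat_of_nonneg hA0).symm
  have hAlt : (PySem.Int.band v ((2 ^ n - 1 : Nat) : Int)).toNat < 2 ^ n := by
    have h2 := Int.toNat_le.mpr hA1
    omega
  obtain ⟨hB0, hB1⟩ := band_bounds v ((2 ^ n - 1) * 2 ^ n)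
  have hBcast : PySem.Int.band v (((2 ^ n - 1) * 2 ^ n : Nat) : Int)
      = (((PySem.Int.band v (((2 ^ n - 1) * 2 ^ n : Nat) : Int)).toNat : Nat) : Int) :=
    (Int.toNat_of_nonneg hB0).symm
  set Bb : Nat := (PySem.Int.band v (((2 ^ n - 1) * 2 ^ n : Nat) : Int)).toNat with hBdef
  rw [hAcast, hBcast]
  have hshiftB : ((Bb : Nat) : Int) >>> n = ((Bb >>> n : Nat) : Int) := by simp
  rw [hshiftB]
  have hBlt : Bb >>> n < 2 ^ n := by
    rw [Nat.shiftRight_eq_div_pow]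
    have h1 : Bb ≤ (2 ^ n - 1) * 2 ^ n := by
      have h2 := Int.toNat_le.mpr hB1
      omega
    have h2 : Bb / 2 ^ n ≤ ((2 ^ n - 1) * 2 ^ n) / 2 ^ n := Nat.div_le_div_right h1
    rw [Nat.mul_div_cancel _ (Nat.pow_pos (by norm_num))] at h2
    omega
  rw [key _ _ n rfl hAlt bit_length, key _ _ n rfl hBlt bit_length]
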